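-- pv_equiv track=rewrite | github.com/tennis-aa/tennis-bracket2 | src/pybracket/basicBrackets.py | generateElo
-- ===== SOURCE A (Python) =====
-- import math
--
-- def generateElo(elo):
--     # helper variables
--     bracketSize = len(elo)
--     rounds = math.log(bracketSize,2)
--     if not rounds.is_integer():
--         raise ValueError("bracketSize has to be 2^n")
--     rounds = int(rounds)
--
--     counter = [0]*(rounds+1)
--     for j in range(rounds):
--         counter[j+1] = counter[j] + int(bracketSize/(2**j))
--
--     # generate brackets based on probabilities from elo
--     bracket = []
--     bracket_elo = []
--     for i in range(int(bracketSize/2)):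
--         if elo[2*i]==0:
--             bracket.append(2*i+1)
--             bracket_elo.append(elo[2*i+1])
--             continue
--         elif elo[2*i+1]==0:
--             bracket.append(2*i)
--             bracket_elo.append(elo[2*i])
--             continue
--
--         if elo[2*i]>elo[2*i+1]:
--             bracket.append(2*i)
--             bracket_elo.append(elo[2*i])
--         else:
--             bracket.append(2*i+1)
--             bracket_elo.append(elo[2*i+1])
--
--     for j in range(1,rounds):
--         for i in range(int(bracketSize/(2**(j+1)))):
--             if bracket_elo[counter[j]-bracketSize+2*i]>bracket_elo[counter[j]-bracketSize+2*i+1]: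
--                 bracket.append(bracket[counter[j]-bracketSize+2*i])
--                 bracket_elo.append(bracket_elo[counter[j]-bracketSize+2*i])
--             else:
--                 bracket.append(bracket[counter[j]-bracketSize+2*i+1])
--                 bracket_elo.append(bracket_elo[counter[j]-bracketSize+2*i+1])
--
--     return bracket
-- ===== SOURCE B (Python) =====
-- import math
--
-- def generateElo(elo):
--     if not math.log(len(elo), 2).is_integer():
--         raise ValueError("bracketSize has to be 2^n")
--     # opening round: an elo of 0 is a bye (the opponent advances); otherwise
--     # the strictly larger elo advances, ties going to the right-hand player
--     winners = []
--     for i in range(0, len(elo) - 1, 2):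
--         a, b = elo[i], elo[i + 1]
--         if a == 0:
--             winners.append((i + 1, b))
--         elif b == 0 or a > b:
--             winners.append((i, a))
--         else:
--             winners.append((i + 1, b))
--     out = [i for i, _ in winners]
--     # Every later round is computed directly from the opening-round list:
--     # with '>' comparisons and ties going right, the knockout winner of a
--     # block of 2^k consecutive opening-round winners is exactly the
--     # rightmost maximum of that block, so scan each block for it.
--     block = 2
--     while block <= len(winners):
--         rest = winners
--         while rest:
--             chunk, rest = rest[:block], rest[block:]
--             best = chunk[0]
--             for p in chunk[1:]:
--                 if p[1] >= best[1]:
--                     best = p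
--             out.append(best[0])
--         block *= 2
--     return out
-- ===== Notes on version B (the rewrite author's own statement) =====
-- stated objective: alternative
-- what changed: A runs a pairwise knockout: round after round it compares adjacent survivors and appends each pair's winner, addressing a flat bracket array through a precomputed counter offset table; B computes only the opening round (with its bye/zero rule) and then derives every later round directly from that fixed list, scanning each block of 2^k consecutive opening-round winners for its rightmost maximum, which is provably the knockout winner of that block under '>' with ties to the right.
import Mathlib
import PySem

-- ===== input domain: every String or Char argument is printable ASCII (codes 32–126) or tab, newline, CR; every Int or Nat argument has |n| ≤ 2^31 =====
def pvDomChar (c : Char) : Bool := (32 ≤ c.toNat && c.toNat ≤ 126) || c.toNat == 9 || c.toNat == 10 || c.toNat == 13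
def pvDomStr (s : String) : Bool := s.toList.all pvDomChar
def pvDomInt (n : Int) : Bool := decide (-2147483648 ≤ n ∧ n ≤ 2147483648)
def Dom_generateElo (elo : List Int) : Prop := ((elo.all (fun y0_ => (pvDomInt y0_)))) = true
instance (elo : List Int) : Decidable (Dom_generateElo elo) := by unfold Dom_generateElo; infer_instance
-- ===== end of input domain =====

-- B abandons A's round-by-round pairwise knockout over a flat array with a counter
-- offset table: it computes every later round directly from the opening-round list
-- by scanning each block of 2^k consecutive opening-round winners for its rightmost
-- maximum (objective: alternative).

-- ===== PORT A =====
-- first-round loop body: elo[2i]==0 / elo[2i+1]==0 / elo[2i]>elo[2i+1] branches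
def stepA1 (elo : List Int) (s : List Int × List Int) (i : Nat) : List Int × List Int :=
  let a := PySem.List.pyGetD elo (2*(i:Int)) 0
  let b := PySem.List.pyGetD elo (2*(i:Int)+1) 0
  if a = 0 then (s.1 ++ [2*(i:Int)+1], s.2 ++ [b])
  else if b = 0 then (s.1 ++ [2*(i:Int)], s.2 ++ [a])
  else if a > b then (s.1 ++ [2*(i:Int)], s.2 ++ [a])
  else (s.1 ++ [2*(i:Int)+1], s.2 ++ [b])

-- later-rounds inner-loop body at flat offset off = counter[j] - bracketSize
def stepA2 (off : Int) (s : List Int × List Int) (i : Nat) : List Int × List Int :=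
  let idx := off + 2*(i:Int)
  if PySem.List.pyGetD s.2 idx 0 > PySem.List.pyGetD s.2 (idx+1) 0 then
    (s.1 ++ [PySem.List.pyGetD s.1 idx 0], s.2 ++ [PySem.List.pyGetD s.2 idx 0])
  else
    (s.1 ++ [PySem.List.pyGetD s.1 (idx+1) 0], s.2 ++ [PySem.List.pyGetD s.2 (idx+1) 0])

def generateElo (elo : List Int) : List Int :=
  let bracketSize := elo.length
  -- math.log(bracketSize, 2).is_integer() holds exactly when bracketSize is a power of two
  -- (checked against CPython for all sizes up to 2^20); on 0 and on non-powers Python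
  -- raises ValueError — those inputs are excluded by Pre_generateElo, the port returns []
  let rounds := Nat.log2 bracketSize
  if 2 ^ rounds = bracketSize then
    -- counter[j+1] = counter[j] + int(bracketSize/(2**j)); the float division is exact here
    let counter : List Int :=
      (List.range rounds).foldl
        (fun c j => c.set (j+1) (c.getD j 0 + ((bracketSize / 2 ^ j : Nat) : Int)))
        (List.replicate (rounds+1) 0)
    let s1 := (List.range (bracketSize / 2)).foldl (stepA1 elo) ([], [])
    -- for j in range(1, rounds): for i in range(int(bracketSize/(2**(j+1)))) (exact division)
    let s2 := (List.range' 1 (rounds - 1)).foldl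
        (fun s j => (List.range (bracketSize / 2 ^ (j+1))).foldl
            (stepA2 (counter.getD j 0 - (bracketSize : Int))) s)
        s1
    s2.1
  else []

-- ===== PORT B =====
-- first-round loop: for i in range(0, len(elo)-1, 2), consuming two entries at a time
def firstRound : Int → List Int → List (Int × Int)
  | i, a :: b :: rest =>
      (if a = 0 then (i+1, b) else if b = 0 ∨ a > b then (i, a) else (i+1, b))
        :: firstRound (i+2) rest
  | _, _ => []

-- 'if p[1] >= best[1]: best = p'
def pvW (best p : Int × Int) : Int × Int := if best.2 ≤ p.2 then p else best

-- inner while: chunk, rest = rest[:block], rest[block:]; best = chunk[0]; scan chunk[1:]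
-- (rest[:block]/rest[block:] with nonnegative block are exactly take/drop, and
-- chunk[0] = c since block ≥ 1).  'block = 0' never occurs (block starts at 2 and
-- doubles); that guard only makes the recursion total.
def chunkRound (block : Nat) : List (Int × Int) → List Int
  | [] => []
  | c :: t =>
    if _h : block = 0 then [] else
      ((List.take block (c :: t)).tail.foldl pvW c).1
        :: chunkRound block (List.drop block (c :: t))
termination_by rest => rest.length
decreasing_by simp; omega

-- outer while: block doubles each pass; '2 ≤ block' always holds (block starts at 2),
-- it only serves termination
def bLoop (winners : List (Int × Int)) (block : Nat) : List Int :=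
  if _h : 2 ≤ block ∧ block ≤ winners.length then
    chunkRound block winners ++ bLoop winners (block * 2)
  else []
termination_by winners.length + 1 - block
decreasing_by omega

def generateElo_alt (elo : List Int) : List Int :=
  -- same power-of-two guard as A (ValueError on other sizes, excluded by Pre_generateElo)
  if 2 ^ (Nat.log2 elo.length) = elo.length then
    let winners := firstRound 0 elo
    winners.map Prod.fst ++ bLoop winners 2
  else []

-- ===== PRECONDITION & SPEC =====
-- Pre_ excludes exactly the inputs where A raises ValueError: lengths that are not a power
-- of two (including the empty list, where math.log(0, 2) raises).
def Pre_generateElo (elo : List Int) : Prop := 2 ^ (Nat.log2 elo.length) = elo.length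
instance (elo : List Int) : Decidable (Pre_generateElo elo) := by unfold Pre_generateElo; infer_instance
def pvWitness_generateElo : List Int := [3, 1, 0, 2]

def Spec_generateElo (elo : List Int) (out : List Int) : Prop := out = generateElo_alt elo
instance (elo : List Int) (out : List Int) : Decidable (Spec_generateElo elo out) := by unfold Spec_generateElo; infer_instance

-- ===== CLAIM (what is proved, stated in full; the proofs are below) =====
def Claim_equal_generateElo : Prop := ∀ (elo : List Int), Dom_generateElo elo → Pre_generateElo elo → Spec_generateElo elo (generateElo elo)

-- ===== LEMMAS AND PROOFS =====

-- two-at-a-time list induction, matching how both programs consume pair lists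
theorem pairInd {α : Type} (P : List α → Prop) (h0 : P []) (h1 : ∀ a, P [a])
    (h2 : ∀ a b l, P l → P (a :: b :: l)) : ∀ l, P l
  | [] => h0
  | [a] => h1 a
  | a :: b :: l => h2 a b l (pairInd P h0 h1 h2 l)

-- ghost pairwise knockout round: adjacent winners, ties to the right (= pvW)
def pairAll : List (Int × Int) → List (Int × Int)
  | p :: q :: rest => pvW p q :: pairAll rest
  | _ => []

theorem pairAll_length : ∀ (l : List (Int × Int)), (pairAll l).length = l.length / 2
  | [] => rfl
  | [_] => by simp [pairAll]
  | _ :: _ :: l => by simp [pairAll, pairAll_length l]; omega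

-- ghost of the remaining rounds: winners of each knockout round, recursively
def allRounds (cur : List (Int × Int)) : List (Int × Int) :=
  if cur.length ≤ 1 then []
  else pairAll cur ++ allRounds (pairAll cur)
termination_by cur.length
decreasing_by simp [pairAll_length]; omega

theorem pyGetD_mid0 (P Q : List Int) (x : Int) :
    PySem.List.pyGetD (P ++ x :: Q) (P.length) 0 = x := by
  rw [PySem.List.pyGetD_natCast]; simp [List.getD_eq_getElem?_getD]

theorem pyGetD_mid1 (P Q : List Int) (x y : Int) :
    PySem.List.pyGetD (P ++ x :: y :: Q) ((P.length : Int) + 1) 0 = y := by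
  have : ((P.length : Int) + 1) = ((P.length + 1 : Nat) : Int) := by push_cast; ring
  rw [this, PySem.List.pyGetD_natCast]
  simp [List.getD_eq_getElem?_getD]

theorem firstRound_len : ∀ (i : Int) (l : List Int), (firstRound i l).length = l.length / 2 := by
  intro i l
  induction l using pairInd generalizing i with
  | h0 => simp [firstRound]
  | h1 a => simp [firstRound]
  | h2 a b l ih => simp [firstRound, ih]; omega

-- the first-round loop of A computes exactly B's firstRound, indices included
theorem firstA_aux : ∀ (rest : List Int), ∀ (done B E : List Int) (i0 : Nat),
    done.length = 2 * i0 →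
    (List.range' i0 (rest.length / 2)).foldl (stepA1 (done ++ rest)) (B, E)
      = (B ++ (firstRound (done.length : Int) rest).map Prod.fst,
         E ++ (firstRound (done.length : Int) rest).map Prod.snd) := by
  intro rest
  induction rest using pairInd with
  | h0 => intro done B E i0 h; simp [firstRound]
  | h1 a => intro done B E i0 h; simp [firstRound]
  | h2 a b l ih =>
    intro done B E i0 h
    have hlen : (a :: b :: l).length / 2 = l.length / 2 + 1 := by simp; omega
    rw [hlen, List.range'_succ, List.foldl_cons]
    have hcast : 2*(i0:Int) = (done.length : Int) := by omega
    have hg0 : PySem.List.pyGetD (done ++ a :: b :: l) (2*(i0:Int)) 0 = a := by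
      rw [hcast]; exact pyGetD_mid0 done _ a
    have hg1 : PySem.List.pyGetD (done ++ a :: b :: l) (2*(i0:Int)+1) 0 = b := by
      rw [hcast]; exact pyGetD_mid1 done _ a b
    set w : Int × Int := if a = 0 then ((done.length:Int)+1, b) else if b = 0 ∨ a > b then ((done.length:Int), a) else ((done.length:Int)+1, b) with hw
    have hstep : stepA1 (done ++ a :: b :: l) (B, E) i0 = (B ++ [w.1], E ++ [w.2]) := by
      simp only [stepA1, hg0, hg1, hw]
      split_ifs with h1 h2 h3 <;> simp_all
      all_goals omega
    rw [hstep]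
    have hassoc : done ++ a :: b :: l = (done ++ [a, b]) ++ l := by simp
    rw [hassoc]
    rw [ih (done ++ [a, b]) (B ++ [w.1]) (E ++ [w.2]) (i0+1) (by simp; omega)]
    have hfr : firstRound (done.length : Int) (a :: b :: l)
        = w :: firstRound ((done.length : Int) + 2) l := by
      simp only [firstRound, hw]
    have hlc : (((done ++ [a, b]).length : Int)) = (done.length : Int) + 2 := by simp
    rw [hlc, hfr]
    simp

-- one pass of A's inner loop appends exactly the winners pairAll computes
theorem innerA_aux : ∀ (R : List (Int × Int)), ∀ (W : List (Int × Int)) (Bp Ep : List Int)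
    (off : Int) (i0 : Nat),
    (Bp.length : Int) = off + 2 * i0 → (Ep.length : Int) = off + 2 * i0 →
    (List.range' i0 (R.length / 2)).foldl (stepA2 off)
        (Bp ++ R.map Prod.fst ++ W.map Prod.fst, Ep ++ R.map Prod.snd ++ W.map Prod.snd)
      = (Bp ++ R.map Prod.fst ++ (W ++ pairAll R).map Prod.fst,
         Ep ++ R.map Prod.snd ++ (W ++ pairAll R).map Prod.snd) := by
  intro R
  induction R using pairInd with
  | h0 => intro W Bp Ep off i0 hB hE; simp [pairAll]
  | h1 a => intro W Bp Ep off i0 hB hE; simp [pairAll]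
  | h2 a b l ih =>
    intro W Bp Ep off i0 hB hE
    have hlen : (a :: b :: l).length / 2 = l.length / 2 + 1 := by simp; omega
    rw [hlen, List.range'_succ, List.foldl_cons]
    have hE0 : PySem.List.pyGetD (Ep ++ (a :: b :: l).map Prod.snd ++ W.map Prod.snd) (off + 2*(i0:Int)) 0 = a.2 := by
      have h1 : Ep ++ (a :: b :: l).map Prod.snd ++ W.map Prod.snd
          = Ep ++ a.2 :: (b.2 :: (l.map Prod.snd ++ W.map Prod.snd)) := by simp
      rw [h1, ← hE]; exact pyGetD_mid0 _ _ _
    have hE1 : PySem.List.pyGetD (Ep ++ (a :: b :: l).map Prod.snd ++ W.map Prod.snd) (off + 2*(i0:Int) + 1) 0 = b.2 := by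
      have h1 : Ep ++ (a :: b :: l).map Prod.snd ++ W.map Prod.snd
          = Ep ++ a.2 :: b.2 :: (l.map Prod.snd ++ W.map Prod.snd) := by simp
      rw [h1, ← hE]; exact pyGetD_mid1 _ _ _ _
    have hB0 : PySem.List.pyGetD (Bp ++ (a :: b :: l).map Prod.fst ++ W.map Prod.fst) (off + 2*(i0:Int)) 0 = a.1 := by
      have h1 : Bp ++ (a :: b :: l).map Prod.fst ++ W.map Prod.fst
          = Bp ++ a.1 :: (b.1 :: (l.map Prod.fst ++ W.map Prod.fst)) := by simp
      rw [h1, ← hB]; exact pyGetD_mid0 _ _ _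
    have hB1 : PySem.List.pyGetD (Bp ++ (a :: b :: l).map Prod.fst ++ W.map Prod.fst) (off + 2*(i0:Int) + 1) 0 = b.1 := by
      have h1 : Bp ++ (a :: b :: l).map Prod.fst ++ W.map Prod.fst
          = Bp ++ a.1 :: b.1 :: (l.map Prod.fst ++ W.map Prod.fst) := by simp
      rw [h1, ← hB]; exact pyGetD_mid1 _ _ _ _
    set w : Int × Int := pvW a b with hw
    have hstep : stepA2 off (Bp ++ (a :: b :: l).map Prod.fst ++ W.map Prod.fst,
        Ep ++ (a :: b :: l).map Prod.snd ++ W.map Prod.snd) i0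
        = (Bp ++ (a :: b :: l).map Prod.fst ++ W.map Prod.fst ++ [w.1],
           Ep ++ (a :: b :: l).map Prod.snd ++ W.map Prod.snd ++ [w.2]) := by
      simp only [stepA2, hE0, hE1, hB0, hB1, hw, pvW]
      split_ifs with h1 h2 <;> simp_all
      all_goals omega
    rw [hstep]
    have hshape1 : Bp ++ (a :: b :: l).map Prod.fst ++ W.map Prod.fst ++ [w.1]
        = (Bp ++ [a.1, b.1]) ++ l.map Prod.fst ++ (W ++ [w]).map Prod.fst := by simp
    have hshape2 : Ep ++ (a :: b :: l).map Prod.snd ++ W.map Prod.snd ++ [w.2]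
        = (Ep ++ [a.2, b.2]) ++ l.map Prod.snd ++ (W ++ [w]).map Prod.snd := by simp
    rw [hshape1, hshape2]
    rw [ih (W ++ [w]) (Bp ++ [a.1, b.1]) (Ep ++ [a.2, b.2]) off (i0+1)
        (by simp; omega) (by simp; omega)]
    have hpa : pairAll (a :: b :: l) = w :: pairAll l := by simp only [pairAll, hw]
    rw [hpa]
    simp

theorem foldl_set_len (f : List Int → Nat → Int) :
    ∀ (l : List Nat) (init : List Int),
      (l.foldl (fun c j => c.set (j+1) (f c j)) init).length = init.length
  | [], _ => rfl
  | j :: l, init => by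
    rw [List.foldl_cons, foldl_set_len f l]
    simp

-- A's counter table: counter[t] = 2^(R+1) - 2^(R+1-t) for t ≤ r after r loop iterations
theorem counterA_spec (R : Nat) :
    ∀ r ≤ R, ∀ t ≤ R,
      ((List.range r).foldl
        (fun c j => c.set (j+1) (c.getD j 0 + ((2^R / 2 ^ j : Nat) : Int)))
        (List.replicate (R+1) 0)).getD t 0
      = if t ≤ r then (2:Int)^(R+1) - (2:Int)^(R+1-t) else 0 := by
  intro r
  induction r with
  | zero =>
    intro _ t htR
    simp [List.getD_eq_getElem?_getD, htR]
    intro ht0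
    subst ht0
    simp
  | succ r ih =>
    intro hrR t htR
    rw [List.range_succ, List.foldl_append, List.foldl_cons, List.foldl_nil]
    set c := (List.range r).foldl
        (fun c j => c.set (j+1) (c.getD j 0 + ((2^R / 2 ^ j : Nat) : Int)))
        (List.replicate (R+1) 0) with hc
    have hlen : c.length = R + 1 := by
      rw [hc, foldl_set_len (fun c j => c.getD j 0 + ((2^R / 2 ^ j : Nat) : Int))]
      simp
    have hvr : c.getD r 0 = (2:Int)^(R+1) - (2:Int)^(R+1-r) := by
      rw [ih (by omega) r (by omega)]; simp
    have hdiv : (2^R / 2^r : Nat) = 2^(R-r) := by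
      rw [Nat.pow_div (by omega) (by omega)]
    have hnew : c.getD r 0 + ((2^R / 2 ^ r : Nat) : Int)
        = (2:Int)^(R+1) - (2:Int)^(R+1-(r+1)) := by
      rw [hvr, hdiv]
      have h1 : R + 1 - r = (R - r) + 1 := by omega
      have h2 : R + 1 - (r+1) = R - r := by omega
      rw [h1, h2]
      push_cast
      ring
    rw [List.getD_eq_getElem?_getD, List.getElem?_set]
    by_cases het : t = r + 1
    · subst het
      rw [hlen]
      have hr : r + 1 < R + 1 := by omega
      simp only [if_pos hr, Option.getD_some, le_refl, if_true]
      rw [hnew]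
    · have hne : ¬ (r + 1 = t) := fun h => het h.symm
      rw [if_neg hne, ← List.getD_eq_getElem?_getD]
      rw [ih (by omega) t htR]
      by_cases htr : t ≤ r
      · have htr1 : t ≤ r + 1 := by omega
        simp [htr, htr1]
      · have htr1 : ¬ t ≤ r + 1 := by omega
        simp [htr, htr1]

-- A's outer loop from round j onward appends exactly the remaining knockout rounds
theorem outerA_aux (n rounds : Nat) (hn : n = 2^rounds) (counter : List Int)
    (hc : ∀ t, 1 ≤ t → t ≤ rounds →
      counter.getD t 0 = (2:Int)^(rounds+1) - (2:Int)^(rounds+1-t)) :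
    ∀ (k : Nat), ∀ (j : Nat) (R : List (Int × Int)) (Bp Ep : List Int),
    j + k = rounds → 1 ≤ j →
    R.length = 2^k →
    (Bp.length : Int) = (2:Int)^rounds - (2:Int)^(k+1) →
    (Ep.length : Int) = (2:Int)^rounds - (2:Int)^(k+1) →
    (List.range' j k).foldl
        (fun s j' => (List.range (n / 2 ^ (j'+1))).foldl
            (stepA2 (counter.getD j' 0 - (n : Int))) s)
        (Bp ++ R.map Prod.fst, Ep ++ R.map Prod.snd)
      = (Bp ++ R.map Prod.fst ++ (allRounds R).map Prod.fst,
         Ep ++ R.map Prod.snd ++ (allRounds R).map Prod.snd) := by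
  intro k
  induction k with
  | zero =>
    intro j R Bp Ep hjk hj hR hB hE
    have h1 : R.length ≤ 1 := by rw [hR]; norm_num
    rw [allRounds]
    simp [h1]
  | succ k ih =>
    intro j R Bp Ep hjk hj hR hB hE
    rw [List.range'_succ, List.foldl_cons]
    have hm : n / 2 ^ (j+1) = R.length / 2 := by
      rw [hn, hR, Nat.pow_div (by omega) (by omega), pow_succ, Nat.mul_div_cancel _ (by omega)]
      congr 1
      omega
    have hoff : counter.getD j 0 - (n : Int) = (2:Int)^rounds - (2:Int)^(k+2) := by
      rw [hc j hj (by omega)]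
      have h1 : rounds + 1 - j = k + 2 := by omega
      rw [h1, hn]
      push_cast
      rw [pow_succ]
      ring
    have hfirst : (List.range (n / 2 ^ (j+1))).foldl
          (stepA2 (counter.getD j 0 - (n : Int))) (Bp ++ R.map Prod.fst, Ep ++ R.map Prod.snd)
        = (Bp ++ R.map Prod.fst ++ (pairAll R).map Prod.fst,
           Ep ++ R.map Prod.snd ++ (pairAll R).map Prod.snd) := by
      have h0 : Bp ++ R.map Prod.fst = Bp ++ R.map Prod.fst ++ (([] : List (Int × Int)).map Prod.fst) := by simp
      have h0' : Ep ++ R.map Prod.snd = Ep ++ R.map Prod.snd ++ (([] : List (Int × Int)).map Prod.snd) := by simp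
      rw [hm, h0, h0', List.range_eq_range']
      rw [innerA_aux R [] Bp Ep (counter.getD j 0 - (n : Int)) 0
        (by rw [hB, hoff]; push_cast; ring_nf)
        (by rw [hE, hoff]; push_cast; ring_nf)]
      simp
    rw [hfirst]
    have hre1 : Bp ++ R.map Prod.fst ++ (pairAll R).map Prod.fst
        = (Bp ++ R.map Prod.fst) ++ (pairAll R).map Prod.fst := by simp
    have hre2 : Ep ++ R.map Prod.snd ++ (pairAll R).map Prod.snd
        = (Ep ++ R.map Prod.snd) ++ (pairAll R).map Prod.snd := by simp
    rw [hre1, hre2]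
    rw [ih (j+1) (pairAll R) (Bp ++ R.map Prod.fst) (Ep ++ R.map Prod.snd)
      (by omega) (by omega)
      (by rw [pairAll_length, hR, pow_succ, Nat.mul_div_cancel _ (by omega)])
      (by simp only [List.length_append, List.length_map, hR]; push_cast; rw [hB]; ring_nf)
      (by simp only [List.length_append, List.length_map, hR]; push_cast; rw [hE]; ring_nf)]
    have hAR : allRounds R = pairAll R ++ allRounds (pairAll R) := by
      rw [allRounds]
      have h2 : 0 < 2^k := pow_pos (by norm_num) k
      have : ¬ R.length ≤ 1 := by rw [hR, pow_succ]; omega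
      simp [this]
    rw [hAR]
    simp

-- ===== B-side lemmas: the block scan computes the knockout winner of the block =====

-- 'rightmost max with ties right' is associative
theorem pvW_assoc (a b c : Int × Int) : pvW (pvW a b) c = pvW a (pvW b c) := by
  simp only [pvW]
  split_ifs <;> first | rfl | omega

-- folding pvW over a knockout round gives the same result as over the round's entrants
theorem foldl_pairAll : ∀ (l : List (Int × Int)), l.length % 2 = 0 →
    ∀ acc, (pairAll l).foldl pvW acc = l.foldl pvW acc := by
  intro l
  induction l using pairInd with
  | h0 => intro _ acc; rfl
  | h1 a => intro h acc; simp at h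
  | h2 a b l ih =>
    intro h acc
    have hl : l.length % 2 = 0 := by simp at h; omega
    simp only [pairAll, List.foldl_cons]
    rw [ih hl, pvW_assoc]

theorem pairAll_append : ∀ (X Y : List (Int × Int)), X.length % 2 = 0 →
    pairAll (X ++ Y) = pairAll X ++ pairAll Y := by
  intro X
  induction X using pairInd with
  | h0 => intro Y _; simp [pairAll]
  | h1 a => intro Y h; simp at h
  | h2 a b X ih =>
    intro Y h
    have hX : X.length % 2 = 0 := by simp at h; omega
    simp only [List.cons_append, pairAll, ih Y hX]


theorem chunkRound_nil (b : Nat) : chunkRound b [] = [] := by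
  rw [chunkRound.eq_def]

theorem chunkRound_cons (b : Nat) (c : Int × Int) (t : List (Int × Int)) (hb : b ≠ 0) :
    chunkRound b (c :: t)
      = ((List.take b (c :: t)).tail.foldl pvW c).1 :: chunkRound b (List.drop b (c :: t)) := by
  rw [chunkRound.eq_def]
  simp [hb]

-- chunkRound on a list whose first block is exactly P peels P off
theorem chunkRound_exact (b : Nat) (p : Int × Int) (P' Q : List (Int × Int))
    (hP : (p :: P').length = b) :
    chunkRound b ((p :: P') ++ Q) = (P'.foldl pvW p).1 :: chunkRound b Q := by
  have hb : b ≠ 0 := by simp at hP; omega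
  have htake : List.take b (p :: (P' ++ Q)) = p :: P' := by
    rw [← List.cons_append, ← hP, List.take_left]
  have hdrop : List.drop b (p :: (P' ++ Q)) = Q := by
    rw [← List.cons_append, ← hP, List.drop_left]
  rw [List.cons_append, chunkRound_cons _ _ _ hb, htake, hdrop, List.tail_cons]

-- a block of 2b entrants has the same scan winner as its knockout round of b
theorem chunkRound_double : ∀ (n : Nat) (l : List (Int × Int)) (b : Nat),
    l.length ≤ n → 1 ≤ b → (2*b) ∣ l.length →
    chunkRound (2*b) l = chunkRound b (pairAll l) := by
  intro n
  induction n with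
  | zero =>
    intro l b hn _ _
    have hl : l = [] := by cases l with | nil => rfl | cons c t => simp at hn
    subst hl
    simp [chunkRound_nil, pairAll]
  | succ n ih =>
    intro l b hn hb hd
    cases l with
    | nil => simp [chunkRound_nil, pairAll]
    | cons c t =>
      obtain ⟨k, hk⟩ := hd
      have hk1 : 1 ≤ k := by
        rcases Nat.eq_zero_or_pos k with h | h
        · subst h; simp at hk
        · exact h
      have hlen2b : 2*b ≤ (c :: t).length := by rw [hk]; calc 2*b = 2*b*1 := by ring
                                                                _ ≤ 2*b*k := by exact Nat.mul_le_mul_left _ hk1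
      obtain ⟨b', hb'⟩ : ∃ b', b = b' + 1 := ⟨b - 1, by omega⟩
      cases t with
      | nil => simp at hlen2b; omega
      | cons x1 t' =>
        -- decompose the first block: X = c :: x1 :: r with r of even length 2b'
        have h2b : 2*b = (2*b' + 1) + 1 := by omega
        set r := List.take (2*b') t' with hr
        have hrlen : r.length = 2*b' := by
          rw [hr, List.length_take]
          simp at hlen2b
          omega
        have htakeX : List.take (2*b) (c :: x1 :: t') = c :: x1 :: r := by
          rw [h2b, List.take_succ_cons, List.take_succ_cons, hr]
        set Y := List.drop (2*b) (c :: x1 :: t') with hY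
        have hXY : c :: x1 :: t' = (c :: x1 :: r) ++ Y := by
          rw [← htakeX, hY, List.take_append_drop]
        -- left side
        have hbne : (2*b) ≠ 0 := by omega
        rw [chunkRound_cons _ _ _ hbne]
        simp only [htakeX]
        -- right side: pairAll splits on the block boundary
        have hXeven : (c :: x1 :: r).length % 2 = 0 := by simp [hrlen]; omega
        have hpa : pairAll (c :: x1 :: t') = pairAll (c :: x1 :: r) ++ pairAll Y := by
          conv_lhs => rw [hXY]
          exact pairAll_append _ _ hXeven
        have hpaX : pairAll (c :: x1 :: r) = pvW c x1 :: pairAll r := rfl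
        have hpaXlen : (pvW c x1 :: pairAll r).length = b := by
          simp [pairAll_length, hrlen]; omega
        rw [hpa, hpaX, chunkRound_exact b _ _ _ hpaXlen]
        -- the heads agree: scanning the knockout round = scanning the entrants
        have hreven : r.length % 2 = 0 := by rw [hrlen]; omega
        have hhead : ((c :: x1 :: r).tail.foldl pvW c) = (pairAll r).foldl pvW (pvW c x1) := by
          rw [foldl_pairAll r hreven]
          simp [List.foldl_cons]
        rw [List.tail_cons] at hhead ⊢
        rw [hhead]
        -- the tails agree by induction on the rest of the list
        have hYlen : Y.length = 2*b*(k-1) := by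
          have hms : 2*b*(k-1) = 2*b*k - 2*b := by rw [Nat.mul_sub, Nat.mul_one]
          rw [hY, List.length_drop, hk, hms]
        have hYsmall : Y.length ≤ n := by
          rw [hY, List.length_drop]
          simp at hn ⊢
          omega
        rw [ih Y b hYsmall hb ⟨k-1, hYlen⟩]

-- block size 1: each entrant is its own chunk winner
theorem chunkRound_one : ∀ (l : List (Int × Int)), chunkRound 1 l = l.map Prod.fst := by
  intro l
  induction l with
  | nil => simp [chunkRound_nil]
  | cons c t ih =>
    rw [chunkRound_cons _ _ _ (by omega)]
    simp [ih]

-- bLoop at block 2^(j+1) over the entrants = bLoop at block 2^j over their knockout round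
theorem bLoop_shift : ∀ (fuel j m : Nat) (l : List (Int × Int)),
    l.length = 2^m → 1 ≤ j → m ≤ j + fuel →
    bLoop l (2^(j+1)) = bLoop (pairAll l) (2^j) := by
  intro fuel
  induction fuel with
  | zero =>
    intro j m l hl hj hm
    have h1 : ¬ (2 ≤ 2^(j+1) ∧ 2^(j+1) ≤ l.length) := by
      rw [hl]
      intro ⟨_, hle⟩
      have : (2:Nat)^m < 2^(j+1) := Nat.pow_lt_pow_right (by norm_num) (by omega)
      omega
    have h2 : ¬ (2 ≤ 2^j ∧ 2^j ≤ (pairAll l).length) := by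
      rw [pairAll_length, hl]
      intro ⟨_, hle⟩
      have hmj : m ≤ j := by omega
      have : (2:Nat)^m ≤ 2^j := Nat.pow_le_pow_right (by norm_num) hmj
      have h2m : (2:Nat)^m / 2 < 2^m := by
        have : 0 < (2:Nat)^m := pow_pos (by norm_num) m
        omega
      omega
    rw [bLoop, dif_neg h1, bLoop, dif_neg h2]
  | succ fuel ih =>
    intro j m l hl hj hm
    by_cases hcase : j + 1 ≤ m
    · have hpow : (2:Nat)^(j+1) ≤ 2^m := Nat.pow_le_pow_right (by norm_num) hcase
      have h1 : 2 ≤ 2^(j+1) ∧ 2^(j+1) ≤ l.length := by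
        constructor
        · calc (2:Nat) = 2^1 := by norm_num
            _ ≤ 2^(j+1) := Nat.pow_le_pow_right (by norm_num) (by omega)
        · omega
      have hpal : (pairAll l).length = 2^(m-1) := by
        rw [pairAll_length, hl]
        have : (2:Nat)^m = 2^(m-1) * 2 := by
          rw [← pow_succ]
          congr 1
          omega
        omega
      have h2 : 2 ≤ 2^j ∧ 2^j ≤ (pairAll l).length := by
        constructor
        · calc (2:Nat) = 2^1 := by norm_num
            _ ≤ 2^j := Nat.pow_le_pow_right (by norm_num) hj
        · rw [hpal]
          exact Nat.pow_le_pow_right (by norm_num) (by omega)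
      rw [bLoop, dif_pos h1]
      conv_rhs => rw [bLoop]
      rw [dif_pos h2]
      have hchunk : chunkRound (2^(j+1)) l = chunkRound (2^j) (pairAll l) := by
        have h2j : (2:Nat)^(j+1) = 2 * 2^j := by rw [pow_succ]; ring
        rw [h2j]
        exact chunkRound_double l.length l (2^j) (le_refl _)
          (Nat.one_le_two_pow)
          (by rw [← h2j, hl]; exact pow_dvd_pow 2 hcase)
      rw [hchunk]
      have hrec : bLoop l (2^(j+1) * 2) = bLoop (pairAll l) (2^j * 2) := by
        have e1 : (2:Nat)^(j+1) * 2 = 2^(j+2) := (pow_succ 2 (j+1)).symm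
        have e2 : (2:Nat)^j * 2 = 2^(j+1) := (pow_succ 2 j).symm
        rw [e1, e2]
        exact ih (j+1) m l hl (by omega) (by omega)
      rw [hrec]
    · exact ih j m l hl hj (by omega)

-- B's whole while loop = the knockout rounds, first components
theorem bLoop_eq_allRounds : ∀ (m : Nat) (l : List (Int × Int)),
    l.length = 2^m → bLoop l 2 = (allRounds l).map Prod.fst := by
  intro m
  induction m with
  | zero =>
    intro l hl
    rw [bLoop, allRounds]
    simp [hl]
  | succ m ih =>
    intro l hl
    rw [bLoop]
    have h1 : 2 ≤ 2 ∧ 2 ≤ l.length := by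
      refine ⟨le_refl _, ?_⟩
      rw [hl]
      calc (2:Nat) = 2^1 := by norm_num
        _ ≤ 2^(m+1) := Nat.pow_le_pow_right (by norm_num) (by omega)
    rw [dif_pos h1]
    have hchunk : chunkRound 2 l = (pairAll l).map Prod.fst := by
      have h2 : (2:Nat) = 2*1 := by norm_num
      rw [h2, chunkRound_double l.length l 1 (le_refl _) (le_refl _)
        ⟨2^m, by rw [hl, pow_succ]; ring⟩, chunkRound_one]
    have hpal : (pairAll l).length = 2^m := by
      rw [pairAll_length, hl]
      have : (2:Nat)^(m+1) = 2^m * 2 := by rw [pow_succ]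
      omega
    have hshift : bLoop l (2*2) = bLoop (pairAll l) 2 := by
      have e1 : (2:Nat)*2 = 2^(1+1) := by norm_num
      have e2 : (2:Nat) = 2^1 := by norm_num
      rw [e1]
      conv_rhs => rw [e2]
      exact bLoop_shift m 1 (m+1) l hl (le_refl _) (by omega)
    rw [hchunk, hshift, ih (pairAll l) hpal]
    have hAR : allRounds l = pairAll l ++ allRounds (pairAll l) := by
      rw [allRounds]
      have : ¬ l.length ≤ 1 := by
        rw [hl]
        have : (2:Nat) ≤ 2^(m+1) := by
          calc (2:Nat) = 2^1 := by norm_num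
            _ ≤ 2^(m+1) := Nat.pow_le_pow_right (by norm_num) (by omega)
        omega
      simp [this]
    rw [hAR]
    simp

-- ===== VERDICT (by name: the statement is the Claim_ definition above) =====
theorem generateElo_spec : Claim_equal_generateElo := by
  intro elo _ hpre
  simp only [Spec_generateElo, generateElo, generateElo_alt]
  have hpre' : 2 ^ (Nat.log2 elo.length) = elo.length := hpre
  rw [if_pos hpre', if_pos hpre']
  set n := elo.length with hn
  set r := Nat.log2 n with hr
  set FR := firstRound 0 elo with hFR
  have hfrl : FR.length = 2^r / 2 := by
    rw [hFR, firstRound_len, ← hn, ← hpre']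
  have h1 : (List.range (n / 2)).foldl (stepA1 elo) (([] : List Int), ([] : List Int))
      = (FR.map Prod.fst, FR.map Prod.snd) := by
    have := firstA_aux elo [] [] [] 0 (by simp)
    simpa [List.range_eq_range', hn] using this
  rw [h1]
  rw [← hpre']
  by_cases hr0 : r = 0
  · have hFR0 : FR = [] := by
      have hl : FR.length = 0 := by rw [hfrl, hr0]; norm_num
      exact List.eq_nil_of_length_eq_zero hl
    rw [hr0]
    rw [bLoop]
    simp [hFR0]
  · have hr1 : (r - 1) + 1 = r := by omega
    have hfrl' : FR.length = 2^(r-1) := by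
      rw [hfrl]
      have : (2:Nat)^r = 2^(r-1) * 2 := by rw [← pow_succ, hr1]
      omega
    set counter : List Int := (List.range r).foldl
        (fun c j => c.set (j+1) (c.getD j 0 + ((2^r / 2 ^ j : Nat) : Int)))
        (List.replicate (r+1) 0) with hcounter
    have hc : ∀ t, 1 ≤ t → t ≤ r →
        counter.getD t 0 = (2:Int)^(r+1) - (2:Int)^(r+1-t) := by
      intro t ht1 ht2
      rw [hcounter, counterA_spec r r (le_refl r) t ht2, if_pos ht2]
    have hst : ((FR.map Prod.fst, FR.map Prod.snd) : List Int × List Int)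
        = (([] : List Int) ++ FR.map Prod.fst, ([] : List Int) ++ FR.map Prod.snd) := by simp
    rw [hst]
    rw [outerA_aux (2^r) r rfl counter hc (r-1) 1 FR [] []
      (by omega) (le_refl 1)
      hfrl'
      (by rw [hr1]; simp)
      (by rw [hr1]; simp)]
    rw [bLoop_eq_allRounds (r-1) FR hfrl']
    simp
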